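-- pv_equiv track=rewrite | github.com/Krrish109/StreamRAG | streamrag/bridge.py | _path_similarity
-- ===== SOURCE A (Python) =====
-- def _path_similarity(file_a: str, file_b: str) -> int:
--     """Score how similar two file paths are by shared directory prefix."""
--     parts_a = file_a.split("/")
--     parts_b = file_b.split("/")
--     shared = 0
--     for a, b in zip(parts_a, parts_b):
--         if a == b:
--             shared += 1
--         else:
--             break
--     return shared
-- ===== SOURCE B (Python) =====
-- def _path_similarity(file_a: str, file_b: str) -> int:
--     """Score how similar two file paths are by shared directory prefix."""
--     # Character-level: never split into components. Find the longest common
--     # character prefix k, count the '/' separators inside it, and add one more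
--     # component if the common prefix ends exactly at a component boundary in
--     # both paths (end of string or a '/').
--     n = min(len(file_a), len(file_b))
--     k = 0
--     while k < n and file_a[k] == file_b[k]:
--         k += 1
--     at_a = k == len(file_a) or file_a[k] == "/"
--     at_b = k == len(file_b) or file_b[k] == "/"
--     shared = file_a.count("/", 0, k)
--     return shared + 1 if (at_a and at_b) else shared
-- ===== Notes on version B (the rewrite author's own statement) =====
-- stated objective: alternative
-- what changed: B never splits the paths into component lists: it scans the raw characters once to find the longest common character prefix, counts the '/' separators inside it, and adds one when that prefix ends at a component boundary (end of string or '/') in both paths; A builds both split lists and zips them.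
import Mathlib
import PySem

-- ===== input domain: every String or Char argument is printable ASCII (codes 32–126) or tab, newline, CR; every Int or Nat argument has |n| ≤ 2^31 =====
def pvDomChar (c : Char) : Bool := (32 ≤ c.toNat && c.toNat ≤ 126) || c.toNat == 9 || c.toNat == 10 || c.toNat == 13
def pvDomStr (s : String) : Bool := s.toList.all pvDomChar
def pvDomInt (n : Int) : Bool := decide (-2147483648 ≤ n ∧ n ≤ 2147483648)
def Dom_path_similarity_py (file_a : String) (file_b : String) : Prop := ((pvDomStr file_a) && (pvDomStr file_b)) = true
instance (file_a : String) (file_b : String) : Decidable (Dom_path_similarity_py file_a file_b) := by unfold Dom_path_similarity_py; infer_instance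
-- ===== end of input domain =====

-- B scans the raw characters once (common-prefix length, slash count, boundary
-- test) instead of splitting both paths into component lists and zipping them
-- (objective: alternative algorithm, same cost, no intermediate lists).

-- ===== PORT A =====
-- for a, b in zip(parts_a, parts_b): if a == b: shared += 1 else: break
def pvALoop : List (List Char × List Char) → Int → Int
  | [], shared => shared
  | (a, b) :: rest, shared => if a = b then pvALoop rest (shared + 1) else shared

def path_similarity_py (file_a : String) (file_b : String) : Int :=
  let parts_a := PySem.Chars.splitOn file_a.toList ['/']   -- file_a.split("/")
  let parts_b := PySem.Chars.splitOn file_b.toList ['/']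
  pvALoop (parts_a.zip parts_b) 0

-- ===== PORT B =====
-- while k < n and file_a[k] == file_b[k]: k += 1   (simultaneous walk over both char lists)
def pvCommonLen : List Char → List Char → Nat
  | a :: as, b :: bs => if a = b then pvCommonLen as bs + 1 else 0
  | _, _ => 0

-- k == len(s) or s[k] == "/"   (used only with k ≤ len(s))
def pvAtBoundary (s : List Char) (k : Nat) : Bool :=
  match s.drop k with
  | [] => true
  | c :: _ => c = '/'

def path_similarity_py_alt (file_a : String) (file_b : String) : Int :=
  let xs := file_a.toList
  let ys := file_b.toList
  let k := pvCommonLen xs ys                       -- the while loop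
  let at_a := pvAtBoundary xs k
  let at_b := pvAtBoundary ys k
  let shared := (xs.take k).count '/'              -- file_a.count("/", 0, k): exact for a 1-char needle
  if at_a && at_b then (shared : Int) + 1 else (shared : Int)

-- ===== PRECONDITION & SPEC =====
def Spec_path_similarity_py (file_a : String) (file_b : String) (out : Int) : Prop := out = path_similarity_py_alt file_a file_b
instance (file_a : String) (file_b : String) (out : Int) : Decidable (Spec_path_similarity_py file_a file_b out) := by unfold Spec_path_similarity_py; infer_instance

-- ===== CLAIM (what is proved, stated in full; the proofs are below) =====
def Claim_equal_path_similarity_py : Prop := ∀ (file_a : String) (file_b : String), Dom_path_similarity_py file_a file_b → Spec_path_similarity_py file_a file_b (path_similarity_py file_a file_b)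

-- ===== LEMMAS AND PROOFS =====

-- reference split on '/' by structural recursion (proof-side only)
def pvSplit : List Char → List (List Char)
  | [] => [[]]
  | c :: rest =>
    match pvSplit rest with
    | h :: t => if c = '/' then [] :: h :: t else (c :: h) :: t
    | [] => []

theorem pvSplit_ne_nil (l : List Char) : pvSplit l ≠ [] := by
  cases l with
  | nil => simp [pvSplit]
  | cons c rest =>
    simp only [pvSplit]
    cases h : pvSplit rest with
    | nil => exact absurd h (pvSplit_ne_nil rest)
    | cons hd tl => by_cases hc : c = '/' <;> simp [hc]

theorem pvSplit_head_tail (l : List Char) :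
    (pvSplit l).headD [] :: (pvSplit l).tail = pvSplit l := by
  cases h : pvSplit l with
  | nil => exact absurd h (pvSplit_ne_nil l)
  | cons hd tl => simp

-- same fact in the simp-normal spelling of headD
theorem pvSplit_head_tail' (l : List Char) :
    (pvSplit l).head?.getD [] :: (pvSplit l).tail = pvSplit l := by
  cases h : pvSplit l with
  | nil => exact absurd h (pvSplit_ne_nil l)
  | cons hd tl => simp

theorem pv_go_eq (fuel : Nat) :
    ∀ (l cur : List Char) (acc : List (List Char)), l.length < fuel →
      PySem.Chars.splitOn.go ['/'] fuel l cur acc =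
        acc.reverse ++ (cur.reverse ++ (pvSplit l).headD []) :: (pvSplit l).tail := by
  induction fuel with
  | zero => intro l cur acc h; omega
  | succ f ih =>
    intro l cur acc h
    cases l with
    | nil => simp [PySem.Chars.splitOn.go, pvSplit]
    | cons c rest =>
      have hlen : rest.length < f := by simpa using h
      by_cases hc : c = '/'
      · have hpre : List.isPrefixOf ['/'] (c :: rest) = true := by
          subst hc; simp [List.isPrefixOf]
        rw [PySem.Chars.splitOn.go, if_pos hpre]
        simp only [List.length_cons, List.drop_succ_cons, List.length_nil, List.drop_zero]
        rw [ih rest [] (cur.reverse :: acc) hlen]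
        have : pvSplit (c :: rest) = [] :: pvSplit rest := by
          simp only [pvSplit, hc]
          cases hr : pvSplit rest with
          | nil => exact absurd hr (pvSplit_ne_nil rest)
          | cons hd tl => simp
        rw [this]
        simp [pvSplit_head_tail' rest]
      · have hpre : List.isPrefixOf ['/'] (c :: rest) = false := by
          simp [List.isPrefixOf]; exact fun e => hc e.symm
        rw [PySem.Chars.splitOn.go, if_neg (by simp [hpre])]
        rw [ih rest (c :: cur) acc hlen]
        have : pvSplit (c :: rest) = (c :: (pvSplit rest).headD []) :: (pvSplit rest).tail := by
          simp only [pvSplit, hc]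
          cases hr : pvSplit rest with
          | nil => exact absurd hr (pvSplit_ne_nil rest)
          | cons hd tl => simp
        rw [this]
        simp

theorem pv_splitOn_eq (l : List Char) :
    PySem.Chars.splitOn l ['/'] = pvSplit l := by
  unfold PySem.Chars.splitOn
  rw [pv_go_eq (l.length + 1) l [] [] (by omega)]
  simpa using pvSplit_head_tail' l

-- length of the common prefix of two lists of components (the value A's loop computes)
def pvCpl : List (List Char) → List (List Char) → Nat
  | a :: as, b :: bs => if a = b then pvCpl as bs + 1 else 0
  | _, _ => 0

theorem pvALoop_eq (xs : List (List Char)) :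
    ∀ ys s, pvALoop (xs.zip ys) s = s + (pvCpl xs ys : Int) := by
  induction xs with
  | nil => intro ys s; cases ys <;> simp [pvALoop, pvCpl]
  | cons a as ih =>
    intro ys s
    cases ys with
    | nil => simp [pvALoop, pvCpl]
    | cons b bs =>
      simp only [List.zip_cons_cons, pvALoop, pvCpl]
      by_cases h : a = b
      · simp [h, ih]; ring
      · simp [h]

-- boundary facts
theorem pvAtBoundary_zero_cons (c : Char) (rest : List Char) :
    pvAtBoundary (c :: rest) 0 = decide (c = '/') := by simp [pvAtBoundary]
theorem pvAtBoundary_succ (c : Char) (rest : List Char) (k : Nat) :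
    pvAtBoundary (c :: rest) (k + 1) = pvAtBoundary rest k := by simp [pvAtBoundary]

-- the heart of the equivalence: component-level common-prefix count = B's character-level formula
theorem pvCpl_nil_right (xs : List (List Char)) : pvCpl xs [] = 0 := by
  cases xs <;> rfl

theorem pvSplit_cons (c : Char) (rest : List Char) :
    pvSplit (c :: rest) = if c = '/' then [] :: pvSplit rest
      else (c :: (pvSplit rest).headD []) :: (pvSplit rest).tail := by
  simp only [pvSplit]
  cases hr : pvSplit rest with
  | nil => exact absurd hr (pvSplit_ne_nil rest)
  | cons hd tl => by_cases hc : c = '/' <;> simp [hc]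

theorem pv_main (xs : List Char) : ∀ ys : List Char,
    pvCpl (pvSplit xs) (pvSplit ys) =
      (xs.take (pvCommonLen xs ys)).count '/' +
        (if pvAtBoundary xs (pvCommonLen xs ys) && pvAtBoundary ys (pvCommonLen xs ys) then 1 else 0) := by
  induction xs with
  | nil =>
    intro ys
    cases ys with
    | nil => simp [pvSplit, pvCpl, pvCommonLen, pvAtBoundary]
    | cons b bs =>
      by_cases hb : b = '/'
      · rw [pvSplit_cons, if_pos hb]
        simp [pvSplit, pvCpl, pvCommonLen, pvAtBoundary, hb]
      · rw [pvSplit_cons, if_neg hb]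
        simp [pvSplit, pvCpl, pvCommonLen, pvAtBoundary, hb]
  | cons a as ih =>
    intro ys
    cases ys with
    | nil =>
      by_cases ha : a = '/'
      · rw [pvSplit_cons, if_pos ha]
        simp [pvSplit, pvCpl, pvCpl_nil_right, pvCommonLen, pvAtBoundary, ha]
      · rw [pvSplit_cons, if_neg ha]
        simp [pvSplit, pvCpl, pvCommonLen, pvAtBoundary, ha]
    | cons b bs =>
      by_cases hab : a = b
      · subst hab
        have hk : pvCommonLen (a :: as) (a :: bs) = pvCommonLen as bs + 1 := by
          simp [pvCommonLen]
        rw [hk]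
        by_cases ha : a = '/'
        · -- matching separator: one more shared component
          rw [pvSplit_cons, pvSplit_cons, if_pos ha, if_pos ha]
          have hl : pvCpl ([] :: pvSplit as) ([] :: pvSplit bs) = pvCpl (pvSplit as) (pvSplit bs) + 1 := by
            simp [pvCpl]
          rw [hl, ih bs]
          simp only [List.take_succ_cons, List.count_cons, pvAtBoundary_succ]
          simp only [ha, BEq.rfl, if_true]
          split_ifs <;> omega
        · -- matching non-separator character: same component continues
          rw [pvSplit_cons, pvSplit_cons, if_neg ha, if_neg ha]
          have hstep : pvCpl ((a :: (pvSplit as).headD []) :: (pvSplit as).tail)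
              ((a :: (pvSplit bs).headD []) :: (pvSplit bs).tail) =
              pvCpl (pvSplit as) (pvSplit bs) := by
            conv_rhs => rw [← pvSplit_head_tail as, ← pvSplit_head_tail bs]
            simp only [pvCpl, List.cons.injEq, true_and]
          rw [hstep, ih bs]
          simp only [List.take_succ_cons, List.count_cons, pvAtBoundary_succ]
          simp [ha]
      · -- first characters differ: no shared component beyond what boundaries give
        have hk : pvCommonLen (a :: as) (b :: bs) = 0 := by simp [pvCommonLen, hab]
        rw [hk]
        simp only [List.take_zero, List.count_nil, pvAtBoundary_zero_cons]
        by_cases ha : a = '/'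
        · by_cases hb : b = '/'
          · exact absurd (ha.trans hb.symm) hab
          · rw [pvSplit_cons, pvSplit_cons, if_pos ha, if_neg hb]
            simp [pvCpl, ha, hb]
        · by_cases hb : b = '/'
          · rw [pvSplit_cons, pvSplit_cons, if_neg ha, if_pos hb]
            simp [pvCpl, ha, hb]
          · rw [pvSplit_cons, pvSplit_cons, if_neg ha, if_neg hb]
            have hne : ¬ (a :: (pvSplit as).headD [] = b :: (pvSplit bs).headD []) := by
              intro h; exact hab (List.cons.injEq .. ▸ h).1
            simp only [pvCpl]
            rw [if_neg hne]
            simp [ha, hb]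

-- ===== VERDICT (by name: the statement is the Claim_ definition above) =====
theorem path_similarity_py_spec : Claim_equal_path_similarity_py := by
  intro file_a file_b _
  unfold Spec_path_similarity_py path_similarity_py path_similarity_py_alt
  rw [pv_splitOn_eq, pv_splitOn_eq, pvALoop_eq, pv_main file_a.toList file_b.toList]
  by_cases hA : pvAtBoundary file_a.toList (pvCommonLen file_a.toList file_b.toList) = true <;>
    by_cases hB : pvAtBoundary file_b.toList (pvCommonLen file_a.toList file_b.toList) = true <;>
      simp [hA, hB]
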